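-- pv_equiv track=rewrite | github.com/ASSERT-KTH/Mokav | experiments/pynguin/c4b/return-lst/generated_tests/src_388/2/src_388.py | func
-- ===== SOURCE A (Python) =====
-- def func(*args):
-- 	ret_values = []
--
-- 	string = args[0]
-- 	vowels = ['A', 'E', 'I', 'O', 'U', 'Y']
-- 	jumps = []
-- 	jump = 1
-- 	for x in string:
-- 	    if (x in vowels):
-- 	        jumps.append(jump)
-- 	        jump = 1
-- 	    else:
-- 	        jump += 1
-- 	jumps.append(jump)
-- 	ret_values.append(max(jumps))
--
-- 	return ret_values
-- ===== SOURCE B (Python) =====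
-- def func(*args):
--     s = args[0]
--     vowels = "AEIOUY"
--     positions = [-1] + [i for i, c in enumerate(s) if c in vowels] + [len(s)]
--     gaps = [q - p for p, q in zip(positions, positions[1:])]
--     return [max(gaps)]
-- ===== Notes on version B (the rewrite author's own statement) =====
-- stated objective: alternative
-- what changed: Replaces the running jump counter that resets at each vowel with a positions-then-differences computation: collect vowel indices with -1/len(s) sentinels and take the max of consecutive differences (comprehensions instead of a stateful loop).
import Mathlib
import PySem

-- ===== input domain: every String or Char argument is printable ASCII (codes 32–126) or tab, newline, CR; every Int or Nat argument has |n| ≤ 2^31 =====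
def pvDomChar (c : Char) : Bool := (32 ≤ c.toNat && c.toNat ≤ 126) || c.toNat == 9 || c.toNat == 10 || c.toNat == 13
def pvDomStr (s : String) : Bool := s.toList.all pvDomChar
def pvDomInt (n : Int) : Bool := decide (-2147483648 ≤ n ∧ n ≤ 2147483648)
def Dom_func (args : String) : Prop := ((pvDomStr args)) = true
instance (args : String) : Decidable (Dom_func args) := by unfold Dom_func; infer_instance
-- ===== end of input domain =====

-- B replaces A's resetting jump counter with a positions-then-consecutive-differences computation (sentinels -1 and len(s)): a structurally different decomposition of the same O(n) task.


-- ===== PORT A =====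
def func (args : String) : List Int :=
  let vowels : List Char := ['A', 'E', 'I', 'O', 'U', 'Y']
  let st := args.toList.foldl
    (fun (st : List Int × Int) x =>
      if x ∈ vowels then (st.1 ++ [st.2], 1) else (st.1, st.2 + 1))
    ([], 1)
  let jumps := st.1 ++ [st.2]
  -- max(jumps): jumps ends with an appended element, so it is never empty and Python's max returns
  [(PySem.List.max? jumps (fun y => y)).getD 0]

-- ===== PORT B =====
def func_alt (args : String) : List Int :=
  let s := args.toList
  let positions : List Int :=
    [-1] ++ (PySem.List.enumerate s 0).filterMap
      (fun ic => if ic.2 ∈ "AEIOUY".toList then some ic.1 else none)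
      ++ [(s.length : Int)]
  let gaps := List.zipWith (fun p q => q - p) positions positions.tail
  [(PySem.List.max? gaps (fun y => y)).getD 0]

-- ===== PRECONDITION & SPEC =====
def Spec_func (args : String) (out : List Int) : Prop := out = func_alt args
instance (args : String) (out : List Int) : Decidable (Spec_func args out) := by unfold Spec_func; infer_instance

-- ===== CLAIM (what is proved, stated in full; the proofs are below) =====
def Claim_equal_func : Prop := ∀ (args : String), Dom_func args → Spec_func args (func args)

-- ===== LEMMAS AND PROOFS =====

-- A's loop output (jumps with the final append), as a standalone recursion
def jumpsFull (cs : List Char) (j : Int) : List Int :=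
  match cs with
  | [] => [j]
  | c :: cs => if c ∈ ['A', 'E', 'I', 'O', 'U', 'Y'] then j :: jumpsFull cs 1 else jumpsFull cs (j + 1)

def vowelIdxs (cs : List Char) (k : Int) : List Int :=
  (PySem.List.enumerate cs k).filterMap
    (fun ic => if ic.2 ∈ "AEIOUY".toList then some ic.1 else none)

def gapsOf (l : List Int) : List Int := List.zipWith (fun p q => q - p) l l.tail

theorem loop_jumps (cs : List Char) (acc : List Int) (j : Int) :
    (cs.foldl
        (fun (st : List Int × Int) x =>
          if x ∈ ['A', 'E', 'I', 'O', 'U', 'Y'] then (st.1 ++ [st.2], 1) else (st.1, st.2 + 1))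
        (acc, j)).1 ++
      [(cs.foldl
        (fun (st : List Int × Int) x =>
          if x ∈ ['A', 'E', 'I', 'O', 'U', 'Y'] then (st.1 ++ [st.2], 1) else (st.1, st.2 + 1))
        (acc, j)).2] = acc ++ jumpsFull cs j := by
  induction cs generalizing acc j with
  | nil => simp [jumpsFull]
  | cons c cs ih =>
    by_cases h : c ∈ ['A', 'E', 'I', 'O', 'U', 'Y']
    · simp only [List.foldl_cons, jumpsFull, h, ite_true]
      rw [ih]; simp
    · simp only [List.foldl_cons, jumpsFull, h, ite_false]
      rw [ih]

theorem gapsOf_cons (a b : Int) (t : List Int) :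
    gapsOf (a :: b :: t) = (b - a) :: gapsOf (b :: t) := rfl

theorem jumpsFull_eq_gaps (cs : List Char) (j k : Int) :
    jumpsFull cs j = gapsOf ((k - j) :: vowelIdxs cs k ++ [k + cs.length]) := by
  induction cs generalizing j k with
  | nil =>
    simp [jumpsFull, vowelIdxs, PySem.List.enumerate, gapsOf, List.zipWith]
  | cons c cs ih =>
    have hL : "AEIOUY".toList = ['A', 'E', 'I', 'O', 'U', 'Y'] := by decide
    have hv : vowelIdxs (c :: cs) k =
        (if c ∈ ['A', 'E', 'I', 'O', 'U', 'Y'] then [k] else []) ++ vowelIdxs cs (k + 1) := by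
      simp only [vowelIdxs, PySem.List.enumerate_cons, List.filterMap_cons, hL]
      split <;> simp_all
    have hlen : k + ((c :: cs).length : Int) = (k + 1) + (cs.length : Int) := by
      simp; ring
    simp only [jumpsFull]
    by_cases h : c ∈ ['A', 'E', 'I', 'O', 'U', 'Y']
    · simp only [hv, h, ite_true, List.cons_append, hlen]
      rw [gapsOf_cons]
      have h1 : k - (k - j) = j := by ring
      have h2 : jumpsFull cs 1 = gapsOf (k :: vowelIdxs cs (k + 1) ++ [k + 1 + (cs.length : Int)]) := by
        have := ih 1 (k + 1)
        have h3 : (k + 1) - 1 = k := by ring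
        rwa [h3] at this
      rw [h1, h2]
      simp
    · simp only [hv, h, ite_false, List.nil_append, hlen]
      have := ih (j + 1) (k + 1)
      have h3 : (k + 1) - (j + 1) = k - j := by ring
      rwa [h3] at this

-- ===== VERDICT (by name: the statement is the Claim_ definition above) =====
theorem func_spec : Claim_equal_func := by
  intro args _
  unfold Spec_func func func_alt
  dsimp only
  rw [loop_jumps args.toList [] 1, List.nil_append,
    jumpsFull_eq_gaps args.toList 1 0]
  have h0 : (0 : Int) - 1 = -1 := by norm_num
  have h1 : (0 : Int) + (args.toList.length : Int) = (args.toList.length : Int) := by ring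
  rw [h0, h1]
  simp [gapsOf, vowelIdxs]
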